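-- pv_equiv track=rewrite | github.com/Minsuh1204/BangbooTranslator | BangbooTranslator.py | char_to_duodecimal
-- ===== SOURCE A (Python) =====
-- def new_b64_table(method: str, target: str | int):
--     # total: 70 characters
--     special_letters = ["+", "/"]
--     match method:
--         case "to_int":
--             char: str = target
--             # 0 1 for special characters (padding "=" should be removed beforehand)
--             if char in special_letters:
--                 return special_letters.index(char)
--             # 2 ~ 11 for numbers
--             elif char.isnumeric():
--                 return int(char) + 2
--             else:
--                 # 12 ~ 69 for alphabets
--                 return ord(char) - 53
--         case "to_str":
--             num: int = target
--             if num <= 1: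
--                 return special_letters[num]
--             elif num <= 11:
--                 return str(num - 2)
--             else:
--                 return chr(num + 53)
--         case _:
--             return None
--
-- def char_to_duodecimal(char: str):
--     # 9 = 00/00/09
--     # 13 = 00/01/01
--     # 1 = 00/00/01
--     num: int = new_b64_table("to_int", char)
--     duodecimal = ""
--     for i in range(3):
--         quotient, num = divmod(num, 12 ** (2 - i))
--         if i == 2 and quotient == 0:
--             # make it two digits
--             adding = f"0{num}" if num < 10 else str(num)
--             duodecimal += adding
--         else:
--             # make it two digits
--             adding = f"0{quotient}" if quotient < 10 else str(quotient)
--             duodecimal += adding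
--     return duodecimal
-- ===== SOURCE B (Python) =====
-- def new_b64_table(method: str, target):
--     # total: 70 characters
--     special_letters = ["+", "/"]
--     match method:
--         case "to_int":
--             char: str = target
--             if char in special_letters:
--                 return special_letters.index(char)
--             elif char.isnumeric():
--                 return int(char) + 2
--             else:
--                 return ord(char) - 53
--         case "to_str":
--             num: int = target
--             if num <= 1:
--                 return special_letters[num]
--             elif num <= 11:
--                 return str(num - 2)
--             else:
--                 return chr(num + 53)
--         case _:
--             return None
--
-- def _pad2(x: int) -> str:
--     return f"0{x}" if x < 10 else str(x)
--
-- def char_to_duodecimal(char: str):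
--     n = new_b64_table("to_int", char)
--     return _pad2(n // 144) + _pad2(n % 144 // 12) + _pad2(n % 12)
-- ===== Notes on version B (the rewrite author's own statement) =====
-- stated objective: simpler
-- what changed: Replaces the three-iteration divmod loop with its i==2/quotient==0 special case by a single closed-form expression of the three base-12 digit groups (n//144, n%144//12, n%12), each formatted by one shared two-digit padding helper.
import Mathlib
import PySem

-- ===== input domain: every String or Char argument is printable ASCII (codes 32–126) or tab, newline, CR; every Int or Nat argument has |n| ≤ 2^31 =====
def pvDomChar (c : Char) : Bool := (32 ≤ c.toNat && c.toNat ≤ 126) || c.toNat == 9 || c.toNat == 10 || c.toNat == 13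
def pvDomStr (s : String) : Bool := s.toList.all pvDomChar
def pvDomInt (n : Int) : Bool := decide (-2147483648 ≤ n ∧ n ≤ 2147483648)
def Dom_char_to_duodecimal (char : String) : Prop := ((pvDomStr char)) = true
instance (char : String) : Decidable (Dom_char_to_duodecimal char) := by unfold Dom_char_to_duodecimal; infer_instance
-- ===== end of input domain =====

-- B replaces A's three-iteration divmod loop by a closed-form computation of the three
-- base-12 two-digit groups (n//144, n%144//12, n%12) with one shared padding helper (objective: simpler).


-- ===== PORT A =====
-- new_b64_table("to_int", char): none = the input raises (ord of a non-length-1 string).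
-- char.isnumeric() is ported as PySem.Str.strIsdigit (exact on the ASCII domain Dom);
-- ord(char) is ported by hand on char.toList (exact: single code point's value, TypeError otherwise).
def pvTableToInt (char : String) : Option Int :=
  if char = "+" ∨ char = "/" then
    (PySem.List.index? ["+", "/"] char).map (fun k => (k : Int))
  else if PySem.Str.strIsdigit char = true then
    (PySem.Int.ofStr? char).map (· + 2)
  else
    match char.toList with
    | [c] => some ((c.toNat : Int) - 53)
    | _ => none

def char_to_duodecimal (char : String) : String :=
  match pvTableToInt char with
  | none => ""  -- Python raises here; excluded by Pre_
  | some num0 =>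
    -- for i in range(3): quotient, num = divmod(num, 12 ** (2 - i)); build the string
    ((PySem.List.pyRange 0 3 1).foldl (fun (st : String × Int) i =>
      let p : Nat := (2 - i).toNat   -- exponent 2 - i, nonnegative for i ∈ range(3)
      let quotient := PySem.Int.floordiv st.2 ((12 : Int) ^ p)
      let num := PySem.Int.mod st.2 ((12 : Int) ^ p)
      let adding :=
        if i = 2 ∧ quotient = 0 then
          (if num < 10 then "0" ++ PySem.Int.toStr num else PySem.Int.toStr num)
        else
          (if quotient < 10 then "0" ++ PySem.Int.toStr quotient else PySem.Int.toStr quotient)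
      (st.1 ++ adding, num)) ("", num0)).1

-- ===== PORT B =====
def pvPad2 (x : Int) : String :=
  if x < 10 then "0" ++ PySem.Int.toStr x else PySem.Int.toStr x

def char_to_duodecimal_alt (char : String) : String :=
  match pvTableToInt char with
  | none => ""  -- Python raises here; excluded by Pre_
  | some n =>
    pvPad2 (PySem.Int.floordiv n 144)
      ++ pvPad2 (PySem.Int.floordiv (PySem.Int.mod n 144) 12)
      ++ pvPad2 (PySem.Int.mod n 12)

-- ===== PRECONDITION & SPEC =====
-- Pre_ excludes exactly the inputs on which the Python raises: char is neither an
-- all-digit string nor a single character (then ord(char) raises TypeError;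
-- the two special base64 characters are single characters, hence admitted).
def Pre_char_to_duodecimal (char : String) : Prop :=
  PySem.Str.strIsdigit char = true ∨ PySem.Str.len char = 1
instance (char : String) : Decidable (Pre_char_to_duodecimal char) := by
  unfold Pre_char_to_duodecimal; infer_instance

def pvWitness_char_to_duodecimal : String := "23"

def Spec_char_to_duodecimal (char : String) (out : String) : Prop := out = char_to_duodecimal_alt char
instance (char : String) (out : String) : Decidable (Spec_char_to_duodecimal char out) := by unfold Spec_char_to_duodecimal; infer_instance

-- ===== CLAIM (what is proved, stated in full; the proofs are below) =====
def Claim_equal_char_to_duodecimal : Prop := ∀ (char : String), Dom_char_to_duodecimal char → Pre_char_to_duodecimal char → Spec_char_to_duodecimal char (char_to_duodecimal char)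

-- ===== LEMMAS AND PROOFS =====
theorem pvRange3 : PySem.List.pyRange 0 3 1 = [0, 1, 2] := by decide

theorem pvLoop_eq (n : Int) :
    ((PySem.List.pyRange 0 3 1).foldl (fun (st : String × Int) i =>
      let p : Nat := (2 - i).toNat
      let quotient := PySem.Int.floordiv st.2 ((12 : Int) ^ p)
      let num := PySem.Int.mod st.2 ((12 : Int) ^ p)
      let adding :=
        if i = 2 ∧ quotient = 0 then
          (if num < 10 then "0" ++ PySem.Int.toStr num else PySem.Int.toStr num)
        else
          (if quotient < 10 then "0" ++ PySem.Int.toStr quotient else PySem.Int.toStr quotient)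
      (st.1 ++ adding, num)) ("", n)).1
    = pvPad2 (PySem.Int.floordiv n 144)
        ++ pvPad2 (PySem.Int.floordiv (PySem.Int.mod n 144) 12)
        ++ pvPad2 (PySem.Int.mod n 12) := by
  rw [pvRange3]
  simp only [List.foldl]
  norm_num [PySem.Int.floordiv_eq_ediv_of_pos, PySem.Int.mod_eq_emod_of_pos, pvPad2,
    (by decide : Int.toNat 2 = 2)]
  by_cases h : (12 : Int) ∣ n
  · simp [h, Int.emod_eq_zero_of_dvd h]
  · simp [h]

-- ===== VERDICT (by name: the statement is the Claim_ definition above) =====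
theorem char_to_duodecimal_spec : Claim_equal_char_to_duodecimal := by
  intro char _ _
  unfold Spec_char_to_duodecimal char_to_duodecimal char_to_duodecimal_alt
  cases pvTableToInt char with
  | none => rfl
  | some n => exact pvLoop_eq n
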